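-- pv_equiv track=rewrite | github.com/Leon-JS02/advent-of-code | 2015/day3/day3.py | process_direction_string
-- ===== SOURCE A (Python) =====
-- def process_direction(direction: str, current_loc: tuple[int, int]) -> tuple[int, int]:
--     """Processes a single direction command and returns the new location."""
--     x, y = current_loc
--     direction_map = {
--         "^": lambda x, y: (x, y + 1),
--         ">": lambda x, y: (x + 1, y),
--         "v": lambda x, y: (x, y - 1),
--         "<": lambda x, y: (x - 1, y)
--     }
--     x, y = current_loc
--     new_dir = direction_map[direction](x, y)
--     return new_dir
--
-- def process_direction_string(directions: list[str]) -> dict: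
--     """Returns a dictionary of house location -> num visits."""
--     current_location = (0, 0)
--     visited_locations = {current_location: 1}
--     for direction in directions:
--         current_location = process_direction(direction, current_location)
--         visited_locations[current_location] = visited_locations.get(
--             current_location, 0) + 1
--     return visited_locations
-- ===== SOURCE B (Python) =====
-- from itertools import accumulate
--
--
-- def process_direction_string(directions: list[str]) -> dict:
--     """Returns a dictionary of house location -> num visits."""
--     dx = {"^": 0, ">": 1, "v": 0, "<": -1}
--     dy = {"^": 1, ">": 0, "v": -1, "<": 0}
--     xs = accumulate((dx[d] for d in directions), initial=0)
--     ys = accumulate((dy[d] for d in directions), initial=0)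
--     positions = list(zip(xs, ys))
--     return {p: positions.count(p) for p in dict.fromkeys(positions)}
-- ===== Notes on version B (the rewrite author's own statement) =====
-- stated objective: alternative
-- what changed: Instead of maintaining a running visit-count dict during the walk, B computes the x- and y-coordinates as two independent prefix sums, zips them into the list of visited houses, dedups it in first-visit order, and counts each distinct house with positions.count; no incremental dict state is kept (it trades the hash tally for a quadratic per-key count).
import Mathlib
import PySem

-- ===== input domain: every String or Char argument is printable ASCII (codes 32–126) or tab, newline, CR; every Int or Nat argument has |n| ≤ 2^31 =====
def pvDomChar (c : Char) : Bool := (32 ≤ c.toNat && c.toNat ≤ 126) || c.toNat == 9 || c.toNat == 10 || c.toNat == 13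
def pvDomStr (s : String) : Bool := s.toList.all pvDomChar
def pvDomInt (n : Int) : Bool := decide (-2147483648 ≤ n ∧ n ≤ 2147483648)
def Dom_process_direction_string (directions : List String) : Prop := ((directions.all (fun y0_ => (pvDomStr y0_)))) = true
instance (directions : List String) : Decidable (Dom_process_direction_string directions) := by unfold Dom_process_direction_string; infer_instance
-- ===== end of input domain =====

-- B drops A's running visit-count dict: it builds the visited houses as two independent
-- coordinate prefix sums zipped together, dedups them in first-visit order and counts each
-- distinct house with positions.count (alternative decomposition; not faster).

-- ===== PORT A =====
-- Python's dict-of-lambdas lookup: an unknown direction raises KeyError (excluded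
-- by Pre_); the port returns the location unchanged there.
def process_direction (direction : String) (current_loc : Int × Int) : Int × Int :=
  let x := current_loc.1
  let y := current_loc.2
  if direction = "^" then (x, y + 1)
  else if direction = ">" then (x + 1, y)
  else if direction = "v" then (x, y - 1)
  else if direction = "<" then (x - 1, y)
  else (x, y)

def process_direction_string (directions : List String) : List (Int × Int × Int) :=
  let init : (Int × Int) × PySem.Dict (Int × Int) Int :=
    ((0, 0), PySem.Dict.ofList [((0, 0), 1)])
  let res := directions.foldl (fun st direction =>
      let current_location := process_direction direction st.1
      (current_location,
       st.2.insert current_location (st.2.getD current_location 0 + 1))) init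
  res.2.items.map (fun p => (p.1.1, p.1.2, p.2))

-- ===== PORT B =====
-- Per-axis delta tables; an unknown direction raises KeyError in Python
-- (excluded by Pre_); the port returns 0 there.
def pvDX (d : String) : Int :=
  if d = "^" then 0 else if d = ">" then 1 else if d = "v" then 0
  else if d = "<" then -1 else 0

def pvDY (d : String) : Int :=
  if d = "^" then 1 else if d = ">" then 0 else if d = "v" then -1
  else if d = "<" then 0 else 0

def process_direction_string_alt (directions : List String) : List (Int × Int × Int) :=
  let xs := List.scanl (· + ·) (0 : Int) (directions.map pvDX)
  let ys := List.scanl (· + ·) (0 : Int) (directions.map pvDY)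
  let positions := xs.zip ys
  (PySem.List.dedup positions).map (fun p => (p.1, p.2, (positions.count p : Int)))

-- ===== PRECONDITION & SPEC =====
-- Pre_ excludes direction strings outside {^, >, v, <}, on which both Pythons raise KeyError.
def Pre_process_direction_string (directions : List String) : Prop :=
  (directions.all (fun d => d == "^" || d == ">" || d == "v" || d == "<")) = true
instance (directions : List String) : Decidable (Pre_process_direction_string directions) := by
  unfold Pre_process_direction_string; infer_instance
def pvWitness_process_direction_string : List String := ["^", ">", "v", "<", "^"]

def Spec_process_direction_string (directions : List String) (out : List (Int × Int × Int)) : Prop := out = process_direction_string_alt directions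
instance (directions : List String) (out : List (Int × Int × Int)) : Decidable (Spec_process_direction_string directions out) := by unfold Spec_process_direction_string; infer_instance

-- ===== CLAIM (what is proved, stated in full; the proofs are below) =====
def Claim_equal_process_direction_string : Prop := ∀ (directions : List String), Dom_process_direction_string directions → Pre_process_direction_string directions → Spec_process_direction_string directions (process_direction_string directions)

-- ===== LEMMAS AND PROOFS =====

-- combined delta used only in the proofs
def pvDelta (d : String) : Int × Int := (pvDX d, pvDY d)

-- A's per-step move equals adding the delta componentwise.
lemma move_eq (dir : String) (p : Int × Int) :
    process_direction dir p = (p.1 + (pvDelta dir).1, p.2 + (pvDelta dir).2) := by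
  unfold process_direction pvDelta pvDX pvDY
  split_ifs <;> simp <;> ring

lemma scanl_cons_tail {α β : Type} (f : β → α → β) (b : β) (l : List α) :
    List.scanl f b l = b :: (List.scanl f b l).tail := by
  cases l <;> simp [List.scanl]

abbrev pvBump (d : PySem.Dict (Int × Int) Int) (p : Int × Int) :
    PySem.Dict (Int × Int) Int := d.insert p (d.getD p 0 + 1)

-- A's fold, from any state, tallies the tail of the pairwise scan.
lemma foldA_eq (dirs : List String) :
    ∀ (loc : Int × Int) (d : PySem.Dict (Int × Int) Int),
      (dirs.foldl (fun st direction =>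
          let current_location := process_direction direction st.1
          (current_location,
           st.2.insert current_location (st.2.getD current_location 0 + 1))) (loc, d)).2
      = ((List.scanl (fun p δ => (p.1 + δ.1, p.2 + δ.2)) loc (dirs.map pvDelta)).tail).foldl
          pvBump d := by
  induction dirs with
  | nil => intro loc d; simp [List.scanl]
  | cons x xs ih =>
    intro loc d
    simp only [List.foldl_cons, List.map_cons, List.scanl_cons, List.tail_cons]
    rw [move_eq]
    rw [scanl_cons_tail (fun p δ => (p.1 + δ.1, p.2 + δ.2))
        (loc.1 + (pvDelta x).1, loc.2 + (pvDelta x).2) (xs.map pvDelta), List.foldl_cons]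
    exact ih _ _

-- B's zip of the two coordinate prefix sums is the pairwise scan.
lemma zip_scanl (l : List (Int × Int)) :
    ∀ (a b : Int),
      (List.scanl (· + ·) a (l.map Prod.fst)).zip (List.scanl (· + ·) b (l.map Prod.snd))
      = List.scanl (fun p δ => (p.1 + δ.1, p.2 + δ.2)) (a, b) l := by
  induction l with
  | nil => intro a b; simp [List.scanl]
  | cons x xs ih =>
    intro a b
    simp only [List.map_cons, List.scanl_cons, List.zip_cons_cons]
    rw [ih]

-- ===== VERDICT (by name: the statement is the Claim_ definition above) =====
theorem process_direction_string_spec : Claim_equal_process_direction_string := by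
  intro directions _ _
  unfold Spec_process_direction_string process_direction_string process_direction_string_alt
  simp only []
  rw [foldA_eq]
  have hmapx : directions.map pvDX = (directions.map pvDelta).map Prod.fst := by
    simp [pvDelta, List.map_map, Function.comp]
  have hmapy : directions.map pvDY = (directions.map pvDelta).map Prod.snd := by
    simp [pvDelta, List.map_map, Function.comp]
  rw [hmapx, hmapy, zip_scanl]
  have hinit : (PySem.Dict.ofList [(((0 : Int), (0 : Int)), (1 : Int))])
      = pvBump PySem.Dict.empty (0, 0) := by rfl
  rw [hinit]
  have key : ∀ (T : List (Int × Int)),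
      List.foldl pvBump (pvBump PySem.Dict.empty ((0, 0) : Int × Int)) T
      = PySem.Dict.counter (((0, 0) : Int × Int) :: T) := by
    intro T
    rw [← PySem.Dict.foldl_insert_getD_add_one_eq_counter]
    rfl
  rw [key]
  rw [← scanl_cons_tail (fun p δ => (p.1 + δ.1, p.2 + δ.2)) ((0, 0) : Int × Int)
      (directions.map pvDelta)]
  rw [PySem.Dict.items_counter]
  simp [List.map_map, Function.comp]
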